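-- pv_equiv track=rewrite | github.com/annececiledunand/non_lineaire | functions/plongement.py | plongement
-- ===== SOURCE A (Python) =====
-- def plongement(x: list, d: int, tau: int) -> list:
--     n = len(x)
--     m = (d-1)*tau
--
--     y = []
--     for i in range(m, n):
--         xn = []
--         for j in range(d):
--             xn.append(x[i - (d-j-1)*tau])
--         xn.reverse()
--         y.append(xn)
--
--     return y
-- ===== SOURCE B (Python) =====
-- def plongement(x: list, d: int, tau: int) -> list:
--     n = len(x)
--     m = (d - 1) * tau
--     if m >= n:
--         return []
--     cols = [x[m - k * tau: n - k * tau] for k in range(d)]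
--     return [[col[r] for col in cols] for r in range(n - m)]
-- ===== Notes on version B (the rewrite author's own statement) =====
-- stated objective: idiomatic
-- what changed: B builds the d delayed columns as slices and transposes them by index, instead of A's per-row inner loop that appends backwards and reverses each row.
import Mathlib
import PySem

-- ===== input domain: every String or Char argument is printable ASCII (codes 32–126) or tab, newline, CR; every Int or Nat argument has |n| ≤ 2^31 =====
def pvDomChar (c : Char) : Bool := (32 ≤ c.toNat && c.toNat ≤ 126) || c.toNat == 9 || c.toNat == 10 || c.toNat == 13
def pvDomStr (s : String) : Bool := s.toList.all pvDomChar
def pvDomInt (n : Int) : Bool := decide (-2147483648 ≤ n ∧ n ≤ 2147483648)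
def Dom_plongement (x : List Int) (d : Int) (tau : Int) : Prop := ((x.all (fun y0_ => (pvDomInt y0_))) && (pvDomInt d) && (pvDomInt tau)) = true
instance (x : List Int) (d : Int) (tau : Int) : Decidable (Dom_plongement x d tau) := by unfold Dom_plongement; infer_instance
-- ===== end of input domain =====

-- B replaces A's per-row inner loop + reverse by slicing the d delayed columns and transposing by index; same cost, return values proved equal on Pre_.

-- ===== PORT A =====
def plongement (x : List Int) (d : Int) (tau : Int) : List (List Int) :=
  let n : Int := (x.length : Int)
  let m : Int := (d - 1) * tau
  (PySem.List.pyRange m n 1).foldl (fun y i =>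
    let xn : List Int := (PySem.List.pyRange 0 d 1).foldl
      (fun xn j => xn ++ [PySem.List.pyGetD x (i - (d - j - 1) * tau) 0]) []
    y ++ [xn.reverse]) []

-- ===== PORT B =====
def plongement_alt (x : List Int) (d : Int) (tau : Int) : List (List Int) :=
  let n : Int := (x.length : Int)
  let m : Int := (d - 1) * tau
  if n ≤ m then [] else
  let cols : List (List Int) := (PySem.List.pyRange 0 d 1).map
    (fun k => PySem.List.slice x (some (m - k * tau)) (some (n - k * tau)))
  (PySem.List.pyRange 0 (n - m) 1).map (fun r => cols.map (fun col => PySem.List.pyGetD col r 0))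

-- ===== PRECONDITION & SPEC =====
-- Pre_ excludes exactly the inputs where Python A raises IndexError: tau < 0 with d ≥ 2
-- makes A read x at an index ≥ len(x) for the last rows.
def Pre_plongement (x : List Int) (d : Int) (tau : Int) : Prop := 0 ≤ tau ∨ d ≤ 1
instance (x : List Int) (d : Int) (tau : Int) : Decidable (Pre_plongement x d tau) := by unfold Pre_plongement; infer_instance

def pvWitness_plongement : List Int × Int × Int := ([10, 20, 30, 40, 50], 2, 1)

def Spec_plongement (x : List Int) (d : Int) (tau : Int) (out : List (List Int)) : Prop := out = plongement_alt x d tau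
instance (x : List Int) (d : Int) (tau : Int) (out : List (List Int)) : Decidable (Spec_plongement x d tau out) := by unfold Spec_plongement; infer_instance

-- ===== CLAIM (what is proved, stated in full; the proofs are below) =====
def Claim_equal_plongement : Prop := ∀ (x : List Int) (d : Int) (tau : Int), Dom_plongement x d tau → Pre_plongement x d tau → Spec_plongement x d tau (plongement x d tau)

-- ===== LEMMAS AND PROOFS =====

-- Per-element bridge: A's reversed-row entry equals B's column-slice entry.
theorem pv_entry_eq (x : List Int) (d tau : Int) (h : 0 ≤ tau ∨ d ≤ 1)
    (r k : Nat) (hr : (r:Int) < (x.length:Int) - (d-1)*tau) (hk : k < d.toNat) :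
    PySem.List.pyGetD x ((d - 1) * tau + (r:Int) - (d - ((d.toNat - 1 - k : Nat):Int) - 1) * tau) 0 =
    PySem.List.pyGetD (PySem.List.slice x (some ((d - 1) * tau - (k:Int) * tau)) (some ((x.length:Int) - (k:Int) * tau))) (r:Int) 0 := by
  have hdpos : 0 < d := by omega
  have hkd : ((d.toNat - 1 - k : Nat):Int) = d - 1 - (k:Int) := by omega
  have htk : 0 <= (k:Int) * tau := by
    rcases h with h | h
    · positivity
    · have : (k:Int) = 0 := by omega
      simp [this]
  have ha0 : 0 <= (d - 1) * tau - (k:Int) * tau := by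
    have heq : (d - 1) * tau - (k:Int) * tau = (d - 1 - (k:Int)) * tau := by ring
    rcases h with h | h
    · rw [heq]; apply mul_nonneg (by omega) h
    · have hk0 : (k:Int) = 0 := by omega
      have hd1 : d = 1 := by omega
      simp [hk0, hd1]
  have hb0 : 0 <= (x.length:Int) - (k:Int) * tau := by omega
  rw [hkd]
  have hidx : (d - 1) * tau + (r:Int) - (d - (d - 1 - (k:Int)) - 1) * tau
      = ((d - 1) * tau - (k:Int) * tau) + (r:Int) := by ring
  rw [hidx]
  rw [PySem.List.slice_toNat _ ha0 hb0]
  rw [PySem.List.pyGetD_eq_getElem _ _ (by omega) (by omega)]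
  simp only [PySem.List.pyGetD_natCast]
  rw [List.getD_eq_getElem?_getD]
  rw [List.getElem?_take_of_lt (by omega), List.getElem?_drop]
  rw [List.getElem?_eq_getElem (by omega)]
  simp only [Option.getD_some]
  congr 1
  omega

-- ===== VERDICT (by name: the statement is the Claim_ definition above) =====
theorem plongement_spec : Claim_equal_plongement := by
  intro x d tau _ hpre
  unfold Spec_plongement plongement plongement_alt Pre_plongement at *
  by_cases hnm : (x.length:Int) ≤ (d - 1) * tau
  · simp [hnm, PySem.List.pyRange_one]
  simp only [if_neg hnm]
  simp only [PySem.List.foldl_append_singleton_eq_map, List.nil_append,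
             PySem.List.pyRange_one, List.map_map]
  apply List.ext_getElem
  · simp
  intro r h1 h2
  simp only [List.length_map, List.length_range] at h1
  simp only [List.getElem_map, List.getElem_range, Function.comp]
  apply List.ext_getElem
  · simp
  intro k hk1 hk2
  simp only [List.getElem_reverse, List.getElem_map, List.getElem_range, List.length_map,
             List.length_reverse, List.length_range] at hk1 hk2 ⊢
  simp only [zero_add, sub_zero] at *
  exact pv_entry_eq x d tau hpre r k (by omega) (by omega)
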